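-- pv_equiv track=rewrite | github.com/leihchen/leetcode | mac/2022/empty_vo.py | terris
-- ===== SOURCE A (Python) =====
-- def terris(board):
--     figure = []
--     n, m = len(board), len(board[0])
--     fall = []
--     for col in range(m):
--         tmp = []
--         for row in range(n):
--             tmp.append(board[row][col])
--         if 'F' not in tmp:
--             continue
--         fs = -1
--         thisfall = float('inf')
--         for j, elem in enumerate(tmp):
--             if elem == 'F':
--                 fs = j
--             if elem == '#' and fs != -1:
--                 thisfall = min(thisfall, j - fs - 1)
--                 fs = -1
--         if fs != -1:
--             thisfall = min(thisfall, n - fs - 1)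
--         fall.append(thisfall)
--     k = min(fall)
--     for i in range(n):
--         for j in range(m):
--             if board[i][j] == 'F':
--                 figure.append([i,j])
--                 board[i][j] = '.'
--     for x, y in figure:
--         board[x+k][y] = 'F'
--
--     return board
-- ===== SOURCE B (Python) =====
-- def terris(board):
--     # Simpler decomposition: no transpose and no stateful segment scan; for each
--     # 'F' cell scan straight down its column to the first '#' (or the floor).
--     # Mutates board in place like the original; same return value.
--     n, m = len(board), len(board[0])
--     rooms = []
--     for i in range(n):
--         for j in range(m):
--             if board[i][j] == 'F':
--                 gap = n - i - 1
--                 for r in range(i + 1, n):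
--                     if board[r][j] == '#':
--                         gap = r - i - 1
--                         break
--                 rooms.append(gap)
--     k = min(rooms)
--     figure = []
--     for i in range(n):
--         for j in range(m):
--             if board[i][j] == 'F':
--                 figure.append([i, j])
--                 board[i][j] = '.'
--     for x, y in figure:
--         board[x + k][y] = 'F'
--     return board
-- ===== Notes on version B (the rewrite author's own statement) =====
-- stated objective: simpler
-- what changed: B drops A's column-transpose and stateful segment scan (fs/thisfall bookkeeping) and instead, for each 'F' cell in a single row-major pass, scans straight down its column to the first '#' (or the floor) and takes the minimum of those gaps; collection/clearing/placement of the figure is unchanged.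
import Mathlib
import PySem

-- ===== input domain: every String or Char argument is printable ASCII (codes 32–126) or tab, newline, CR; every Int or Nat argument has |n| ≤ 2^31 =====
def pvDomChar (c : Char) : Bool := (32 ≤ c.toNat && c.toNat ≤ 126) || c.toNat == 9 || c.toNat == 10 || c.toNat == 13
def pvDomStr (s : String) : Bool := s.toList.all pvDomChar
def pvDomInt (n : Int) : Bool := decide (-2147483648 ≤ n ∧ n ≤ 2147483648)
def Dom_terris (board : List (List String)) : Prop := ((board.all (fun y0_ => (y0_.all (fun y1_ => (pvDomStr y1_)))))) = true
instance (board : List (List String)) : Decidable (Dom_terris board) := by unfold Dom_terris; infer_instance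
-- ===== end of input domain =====

-- B replaces A's transpose + stateful per-column segment scan by a plain row-major scan that,
-- for each 'F' cell, looks straight down its column for the first '#' (objective: simpler).
-- Both A and B mutate the Python argument in place the same way; the Lean ports are about the
-- returned board (which is also the final state of the argument).

-- board[i][j]; the getD default is never read on inputs admitted by Pre_terris
def pvCell (b : List (List String)) (i j : Nat) : String := (b.getD i []).getD j ""

-- board[i][j] = v (functional update; in-range for every use below under Pre_terris)
def pvUpd (b : List (List String)) (i j : Nat) (v : String) : List (List String) :=
  b.set i ((b.getD i []).set j v)

-- Python's min where `none` plays float('inf') (A) / an absent value (both ports)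
def omin : Option Nat → Option Nat → Option Nat
  | none, y => y
  | some a, none => some a
  | some a, some b => some (min a b)

-- ===== PORT A =====
-- body of A's `for j, elem in enumerate(tmp)` loop; fs = -1 is `none`, thisfall = inf is `none`
def pvStepA (st : Option Nat × Option Nat) (p : String × Nat) : Option Nat × Option Nat :=
  let fs := if p.1 = "F" then some p.2 else st.1
  if p.1 = "#" then
    match fs with
    | some f => (none, omin st.2 (some (p.2 - f - 1)))
    | none => (none, st.2)
  else (fs, st.2)

-- A's per-column scan plus the trailing `if fs != -1` floor fix-up.
-- enumerate(tmp) is ported as tmp.zipIdx (exact: the indices are the nonnegative 0,1,2,…)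
def pvColFall (tmp : List String) (n : Nat) : Option Nat :=
  let st := (tmp.zipIdx).foldl pvStepA (none, none)
  match st.1 with
  | some f => omin st.2 (some (n - f - 1))
  | none => st.2

-- the figure-collecting/clearing double loop and the final placement loop (identical in A and B)
def pvDropPhase (board : List (List String)) (n m k : Nat) : List (List String) :=
  let st := (List.range n).foldl (fun st i =>
      (List.range m).foldl (fun (st : List (Nat × Nat) × List (List String)) j =>
        if pvCell st.2 i j = "F" then (st.1 ++ [(i, j)], pvUpd st.2 i j ".") else st) st)
    ([], board)
  st.1.foldl (fun b p => pvUpd b (p.1 + k) p.2 "F") st.2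

-- A's `for col in range(m)` loop building `fall` (n, m as in terris below)
def pvFall (board : List (List String)) : List (Option Nat) :=
  let n := board.length
  let m := (board.headD []).length
  (List.range m).foldl (fun (fall : List (Option Nat)) col =>
    let tmp := (List.range n).map (fun row => pvCell board row col)
    if tmp.contains "F" then fall ++ [pvColFall tmp n] else fall) []

def terris (board : List (List String)) : List (List String) :=
  let n := board.length
  let m := (board.headD []).length   -- len(board[0]); Pre_terris excludes the empty board (IndexError)
  match pvFall board with
  | [] => board            -- Python: min([]) raises ValueError; excluded by Pre_terris
  | h :: t =>
    match t.foldl omin h with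
    | some k => pvDropPhase board n m k
    | none => board        -- unreachable: a column holding an 'F' always yields a finite fall

-- ===== PORT B =====
-- Source B's inner `for r in range(i+1, n): … break` loop: first '#' straight below (i, j)
def pvGapB (board : List (List String)) (n i j : Nat) : Nat :=
  match (List.range' (i + 1) (n - (i + 1))).find? (fun r => pvCell board r j = "#") with
  | some r => r - i - 1
  | none => n - i - 1

-- Source B's row-major double loop building `rooms`
def pvRooms (board : List (List String)) : List Nat :=
  let n := board.length
  let m := (board.headD []).length
  (List.range n).foldl (fun rooms i =>
    (List.range m).foldl (fun (rooms : List Nat) j =>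
      if pvCell board i j = "F" then rooms ++ [pvGapB board n i j] else rooms) rooms) []

def terris_alt (board : List (List String)) : List (List String) :=
  let n := board.length
  let m := (board.headD []).length   -- len(board[0]); Pre_terris excludes the empty board (IndexError)
  match pvRooms board with
  | [] => board            -- Python: min([]) raises ValueError; excluded by Pre_terris
  | h :: t => pvDropPhase board n m (t.foldl min h)

-- ===== PRECONDITION & SPEC =====
-- Exactly the inputs where the Python A returns: a nonempty board, every row at least as long as
-- row 0 (otherwise board[row][col] raises IndexError for some col < len(board[0])), and at least
-- one 'F' among the first len(board[0]) columns (otherwise min of an empty list raises ValueError).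
def Pre_terris (board : List (List String)) : Prop :=
  board ≠ [] ∧ (∀ row ∈ board, (board.headD []).length ≤ row.length) ∧
  ∃ i ∈ List.range board.length, ∃ j ∈ List.range (board.headD []).length, pvCell board i j = "F"
instance (board : List (List String)) : Decidable (Pre_terris board) := by unfold Pre_terris; infer_instance

def pvWitness_terris : List (List String) := [["F", "."], [".", "#"]]

def Spec_terris (board : List (List String)) (out : List (List String)) : Prop := out = terris_alt board
instance (board : List (List String)) (out : List (List String)) : Decidable (Spec_terris board out) := by unfold Spec_terris; infer_instance

-- ===== CLAIM (what is proved, stated in full; the proofs are below) =====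
def Claim_equal_terris : Prop := ∀ (board : List (List String)), Dom_terris board → Pre_terris board → Spec_terris board (terris board)

-- ===== LEMMAS AND PROOFS =====

-- proof-side views ----------------------------------------------------------
-- column j of the board, as A's `tmp` builds it
def colL (board : List (List String)) (n j : Nat) : List String :=
  (List.range n).map (fun i => pvCell board i j)

-- number of cells before the first '#' of l
def twl (l : List String) : Nat := (l.takeWhile (fun s => s ≠ "#")).length

-- min over the 'F' cells of a column of their distance to the first '#' below (none: no 'F')
def Sfun : List String → Option Nat
  | [] => none
  | x :: r => omin (if x = "F" then some (twl r) else none) (Sfun r)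

-- per-cell contribution to the global minimum
def gOpt (board : List (List String)) (n i j : Nat) : Option Nat :=
  if pvCell board i j = "F" then some (twl ((colL board n j).drop (i + 1))) else none

-- omin algebra ---------------------------------------------------------------
theorem omin_none_left (x : Option Nat) : omin none x = x := rfl

theorem omin_none_right (x : Option Nat) : omin x none = x := by cases x <;> rfl

theorem omin_assoc (a b c : Option Nat) : omin (omin a b) c = omin a (omin b c) := by
  cases a <;> cases b <;> cases c <;> simp [omin, Nat.min_assoc]

theorem omin_comm (a b : Option Nat) : omin a b = omin b a := by
  cases a <;> cases b <;> simp [omin, Nat.min_comm]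

theorem omin_right_comm (a x y : Option Nat) : omin (omin a x) y = omin (omin a y) x := by
  rw [omin_assoc, omin_assoc, omin_comm x y]

-- generic fold lemmas --------------------------------------------------------
theorem foldl_app_if {α : Type} (p : α → Prop) [DecidablePred p] (f : α → Nat)
    (l : List α) : ∀ acc : List Nat,
    l.foldl (fun acc x => if p x then acc ++ [f x] else acc) acc
      = acc ++ (l.filter (fun x => decide (p x))).map f := by
  induction l with
  | nil => intro acc; simp
  | cons x t ih =>
    intro acc
    by_cases h : p x <;> simp [h, ih]

theorem foldl_app_if_opt {α : Type} (p : α → Prop) [DecidablePred p] (f : α → Option Nat)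
    (l : List α) : ∀ acc : List (Option Nat),
    l.foldl (fun acc x => if p x then acc ++ [f x] else acc) acc
      = acc ++ (l.filter (fun x => decide (p x))).map f := by
  induction l with
  | nil => intro acc; simp
  | cons x t ih =>
    intro acc
    by_cases h : p x <;> simp [h, ih]

theorem foldl_omin_filter_map {α : Type} (p : α → Prop) [DecidablePred p] (f : α → Option Nat)
    (l : List α) : ∀ a : Option Nat,
    ((l.filter (fun x => decide (p x))).map f).foldl omin a
      = l.foldl (fun a x => omin a (if p x then f x else none)) a := by
  induction l with
  | nil => intro a; simp
  | cons x t ih =>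
    intro a
    by_cases h : p x <;> simp [h, ih, omin_none_right]

theorem foldl_omin_some (l : List Nat) : ∀ a : Nat,
    (l.map some).foldl omin (some a) = some (l.foldl min a) := by
  induction l with
  | nil => intro a; rfl
  | cons x t ih => intro a; simpa [omin] using ih (min a x)

theorem foldl_omin_eq_foldr {α : Type} (g : α → Option Nat) (l : List α) : ∀ a : Option Nat,
    l.foldl (fun acc x => omin acc (g x)) a = omin a (l.foldr (fun x acc => omin (g x) acc) none) := by
  induction l with
  | nil => intro a; simp [omin_none_right]
  | cons x t ih => intro a; simp [ih, omin_assoc]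

theorem foldr_congr_mem {α β : Type} (l : List α) (f g : α → β → β) (b : β)
    (h : ∀ x ∈ l, ∀ acc, f x acc = g x acc) : l.foldr f b = l.foldr g b := by
  induction l with
  | nil => rfl
  | cons x t ih =>
    simp only [List.foldr_cons]
    rw [ih (fun y hy => h y (List.mem_cons_of_mem _ hy)), h x (List.mem_cons_self)]

theorem foldl_congr_mem' {α β : Type} (l : List α) (f g : β → α → β)
    (h : ∀ acc, ∀ x ∈ l, f acc x = g acc x) : ∀ b, l.foldl f b = l.foldl g b := by
  induction l with
  | nil => intro b; rfl
  | cons x t ih =>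
    intro b
    rw [List.foldl_cons, List.foldl_cons, h b x (List.mem_cons_self),
      ih (fun acc y hy => h acc y (List.mem_cons_of_mem _ hy))]

-- flattening a double omin-fold to the pair list -----------------------------
theorem dbl_eq_pairs {α β : Type} (g : α → β → Option Nat) (L2 : List β) (L1 : List α) :
    ∀ a : Option Nat,
    L1.foldl (fun a x => L2.foldl (fun a y => omin a (g x y)) a) a
      = (L1.flatMap (fun x => L2.map (fun y => (x, y)))).foldl (fun a p => omin a (g p.1 p.2)) a := by
  induction L1 with
  | nil => intro a; rfl
  | cons x t ih =>
    intro a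
    simp only [List.flatMap_cons, List.foldl_append, List.foldl_cons, List.foldl_map, ih]

theorem drop_range_aux (n m : Nat) : (List.range n).drop m = List.range' m (n - m) := by
  induction m generalizing n with
  | zero => simp [List.range_eq_range']
  | succ k ih =>
    cases n with
    | zero => simp
    | succ nn =>
      rw [List.range_succ_eq_map, List.drop_succ_cons, ← List.map_drop, ih, Nat.succ_sub_succ]
      rw [show (Nat.succ = (1 + ·)) from funext fun x => (Nat.one_add x).symm,
        List.map_add_range', Nat.add_comm]

-- B's downward scan computes twl of the column suffix ------------------------
theorem find_range'_takeWhile (c : Nat → String) : ∀ (len s : Nat),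
    (((List.range' s len).map c).takeWhile (fun x => x ≠ "#")).length
      = match (List.range' s len).find? (fun r => c r = "#") with
        | some r => r - s
        | none => len := by
  intro len
  induction len with
  | zero => intro s; simp
  | succ k ih =>
    intro s
    rw [List.range'_succ, List.map_cons]
    by_cases h : c s = "#"
    · rw [List.find?_cons_of_pos (by simp [h])]
      simp [h]
    · rw [List.find?_cons_of_neg (by simp [h])]
      have htw : ((c s :: (List.range' (s + 1) k).map c).takeWhile (fun x => x ≠ "#")).length
          = (((List.range' (s + 1) k).map c).takeWhile (fun x => x ≠ "#")).length + 1 := by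
        simp [h]
      rw [htw, ih (s + 1)]
      cases hfind : (List.range' (s + 1) k).find? (fun r => c r = "#") with
      | none => rfl
      | some r =>
        have hmem := List.mem_of_find?_eq_some hfind
        have hge : s + 1 ≤ r := (List.mem_range'_1.mp hmem).1
        show (r - (s + 1)) + 1 = r - s
        omega

theorem gapB_eq_twl (board : List (List String)) (n i j : Nat) :
    pvGapB board n i j = twl ((colL board n j).drop (i + 1)) := by
  have hdrop : (colL board n j).drop (i + 1)
      = (List.range' (i + 1) (n - (i + 1))).map (fun r => pvCell board r j) := by
    rw [colL, ← List.map_drop, drop_range_aux]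
  rw [hdrop, twl, find_range'_takeWhile, pvGapB]
  cases (List.range' (i + 1) (n - (i + 1))).find? (fun r => pvCell board r j = "#") with
  | none => simp; omega
  | some r => simp; omega

-- A's stateful scan computes Sfun --------------------------------------------
theorem afold (rest : List String) : ∀ (off : Nat) (fs tf : Option Nat),
    (∀ f, fs = some f → f < off) →
    (match ((rest.zipIdx off).foldl pvStepA (fs, tf)).1 with
     | some f => omin ((rest.zipIdx off).foldl pvStepA (fs, tf)).2 (some ((off + rest.length) - f - 1))
     | none => ((rest.zipIdx off).foldl pvStepA (fs, tf)).2)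
    = omin (omin tf (fs.map (fun f => (off - f - 1) + twl rest))) (Sfun rest) := by
  induction rest with
  | nil =>
    intro off fs tf hfs
    cases fs with
    | none => simp [Sfun, omin_none_right]
    | some f => simp [Sfun, twl, omin_none_right]
  | cons x r ih =>
    intro off fs tf hfs
    rw [List.zipIdx_cons, List.foldl_cons, List.length_cons,
      show off + (r.length + 1) = (off + 1) + r.length from by omega]
    by_cases hH : x = "#"
    · have hF : ¬ x = "F" := by subst hH; decide
      have htwl : twl (x :: r) = 0 := by simp [twl, hH]
      have hS : Sfun (x :: r) = Sfun r := by simp [Sfun, hF, omin_none_left]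
      cases fs with
      | none =>
        have hstep : pvStepA (none, tf) (x, off) = (none, tf) := by
          simp [pvStepA, hH]
        rw [hstep, ih (off + 1) none tf (by intro f h; cases h), htwl, hS]
        simp
      | some f =>
        have hstep : pvStepA (some f, tf) (x, off) = (none, omin tf (some (off - f - 1))) := by
          simp [pvStepA, hH]
        rw [hstep, ih (off + 1) none (omin tf (some (off - f - 1))) (by intro f h; cases h),
          htwl, hS]
        simp [omin_none_right]
    · have htwl : twl (x :: r) = twl r + 1 := by simp [twl, hH]
      by_cases hF : x = "F"
      · have hstep : pvStepA (fs, tf) (x, off) = (some off, tf) := by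
          cases fs <;> simp [pvStepA, hF]
        have hS : Sfun (x :: r) = omin (some (twl r)) (Sfun r) := by simp [Sfun, hF]
        rw [hstep, ih (off + 1) (some off) tf (by intro f h; cases h; omega), htwl, hS]
        rw [show (Option.some off).map (fun f => (off + 1 - f - 1) + twl r)
            = some (twl r) from by simp]
        cases fs with
        | none => simp [omin_assoc, omin_none_left]
        | some f =>
          have hf : f < off := hfs f rfl
          simp only [Option.map_some]
          cases tf <;> cases hSr : Sfun r <;> simp [omin] <;> omega
      · have hstep : pvStepA (fs, tf) (x, off) = (fs, tf) := by
          cases fs <;> simp [pvStepA, hH, hF]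
        have hS : Sfun (x :: r) = Sfun r := by simp [Sfun, hF, omin_none_left]
        rw [hstep, ih (off + 1) fs tf (by intro f h; have := hfs f h; omega), htwl, hS]
        cases fs with
        | none => rfl
        | some f =>
          have hf : f < off := hfs f rfl
          have : (off + 1 - f - 1) + twl r = (off - f - 1) + (twl r + 1) := by omega
          simp [this]

theorem colFall_eq_Sfun (tmp : List String) : pvColFall tmp tmp.length = Sfun tmp := by
  have h := afold tmp 0 none none (by intro f h; cases h)
  simpa [pvColFall, omin_none_left] using h

theorem Sfun_none_of_not_mem (c : List String) (h : "F" ∉ c) : Sfun c = none := by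
  induction c with
  | nil => rfl
  | cons x r ih =>
    have hx : ¬ x = "F" := by intro hx; exact h (by simp [hx])
    simp [Sfun, hx, omin_none_left, ih (fun hm => h (List.mem_cons_of_mem _ hm))]

-- Sfun in indexed form --------------------------------------------------------
theorem Sfun_eq_foldr (c : List String) :
    Sfun c = (List.range c.length).foldr
      (fun i acc => omin (if c.getD i "" = "F" then some (twl (c.drop (i + 1))) else none) acc)
      none := by
  induction c with
  | nil => rfl
  | cons x r ih =>
    rw [List.length_cons, List.range_succ_eq_map, List.foldr_cons, List.foldr_map]
    simp only [List.getD_cons_succ, List.getD_cons_zero, List.drop_succ_cons]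
    rw [Sfun, ih]
    rfl

theorem colL_length (board : List (List String)) (n j : Nat) : (colL board n j).length = n := by
  simp [colL]

theorem colL_getD (board : List (List String)) (n j i : Nat) (hi : i < n) :
    (colL board n j).getD i "" = pvCell board i j := by
  simp [colL, List.getD, hi]

-- per-column fold of gOpt = Sfun of the column --------------------------------
theorem col_fold_eq_Sfun (board : List (List String)) (n j : Nat) : ∀ a : Option Nat,
    (List.range n).foldl (fun a i => omin a (gOpt board n i j)) a
      = omin a (Sfun (colL board n j)) := by
  intro a
  rw [foldl_omin_eq_foldr, Sfun_eq_foldr, colL_length]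
  congr 1
  apply foldr_congr_mem
  intro i hi acc
  rw [List.mem_range] at hi
  rw [colL_getD board n j i hi, gOpt]

-- the permutation swapping the two traversal orders --------------------------
theorem pairs_perm (n m : Nat) :
    ((List.range n).flatMap (fun i => (List.range m).map (fun j => (i, j)))).Perm
      (((List.range m).flatMap (fun j => (List.range n).map (fun i => (j, i)))).map Prod.swap) := by
  have h1 : (List.range n).flatMap (fun i => (List.range m).map (fun j => (i, j)))
      = (List.range n) ×ˢ (List.range m) := rfl
  have h2 : (List.range m).flatMap (fun j => (List.range n).map (fun i => (j, i)))
      = (List.range m) ×ˢ (List.range n) := rfl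
  rw [h1, h2]
  apply (List.perm_ext_iff_of_nodup ?_ ?_).mpr
  · rintro ⟨a, b⟩
    constructor
    · intro h
      have hm := List.mem_product.mp h
      simp only [List.mem_range] at hm
      refine List.mem_map.mpr ⟨(b, a), List.mem_product.mpr ?_, rfl⟩
      simpa [List.mem_range] using ⟨hm.2, hm.1⟩
    · intro h
      obtain ⟨⟨b', a'⟩, hmem, heq⟩ := List.mem_map.mp h
      obtain ⟨rfl, rfl⟩ : a' = a ∧ b' = b := by
        simpa [Prod.swap, Prod.ext_iff, and_comm] using heq
      have hm := List.mem_product.mp hmem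
      simp only [List.mem_range] at hm
      exact List.mem_product.mpr (by simpa [List.mem_range] using ⟨hm.2, hm.1⟩)
  · exact List.Nodup.product (List.nodup_range) (List.nodup_range)
  · exact ((List.Nodup.product (List.nodup_range) (List.nodup_range)).map
      (fun a b h => by
        cases a; cases b; simpa [Prod.swap, Prod.ext_iff, and_comm] using h))

theorem swap_double_fold (g : Nat → Nat → Option Nat) (n m : Nat) (a : Option Nat) :
    (List.range n).foldl (fun a i => (List.range m).foldl (fun a j => omin a (g i j)) a) a
      = (List.range m).foldl (fun a j => (List.range n).foldl (fun a i => omin a (g i j)) a) a := by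
  rw [dbl_eq_pairs, dbl_eq_pairs (fun j i => g i j)]
  have hmap : ((List.range m).flatMap (fun j => (List.range n).map (fun i => (j, i)))).foldl
        (fun a p => omin a (g p.2 p.1)) a
      = (((List.range m).flatMap (fun j => (List.range n).map (fun i => (j, i)))).map Prod.swap).foldl
        (fun a p => omin a (g p.1 p.2)) a := by
    rw [List.foldl_map]; rfl
  rw [hmap]
  exact @List.Perm.foldl_eq _ _ (fun a p => omin a (g p.1 p.2)) _ _
    ⟨fun b p q => omin_right_comm b (g p.1 p.2) (g q.1 q.2)⟩ (pairs_perm n m) a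

-- the two ports' minima agree -------------------------------------------------
-- the common value: the omin-fold of all per-cell contributions
def Kopt (board : List (List String)) (n m : Nat) : Option Nat :=
  (List.range m).foldl (fun a j => omin a (Sfun (colL board n j))) none

theorem fall_min_eq (board : List (List String)) :
    List.foldl omin none (pvFall board) = Kopt board board.length (board.headD []).length := by
  set n := board.length
  set m := (board.headD []).length
  show List.foldl omin none
      ((List.range m).foldl (fun (fall : List (Option Nat)) col =>
        let tmp := (List.range n).map (fun row => pvCell board row col)
        if tmp.contains "F" then fall ++ [pvColFall tmp n] else fall) [])
    = Kopt board n m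
  have hcol : ∀ col, ((List.range n).map (fun row => pvCell board row col)) = colL board n col := fun _ => rfl
  simp only [hcol]
  rw [foldl_app_if_opt (fun col => (colL board n col).contains "F" = true)
    (fun col => pvColFall (colL board n col) n)]
  rw [List.nil_append, foldl_omin_filter_map]
  unfold Kopt
  apply foldl_congr_mem'
  intro acc j hj
  by_cases h : (colL board n j).contains "F" = true
  · rw [if_pos h]
    have : pvColFall (colL board n j) n = Sfun (colL board n j) := by
      have := colFall_eq_Sfun (colL board n j)
      rwa [colL_length] at this
    rw [this]
  · rw [if_neg h, Sfun_none_of_not_mem]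
    intro hmem
    exact h (List.contains_iff_mem.mpr hmem)

theorem foldl_append_flat {α β : Type} (g : α → List β) (l : List α) :
    ∀ acc, l.foldl (fun acc x => acc ++ g x) acc = acc ++ l.flatMap g := by
  induction l with
  | nil => intro acc; simp
  | cons x t ih => intro acc; simp [ih]

theorem foldl_omin_flat {α : Type} (g : α → List (Option Nat)) (l : List α) :
    ∀ a, (l.flatMap g).foldl omin a = l.foldl (fun a x => (g x).foldl omin a) a := by
  induction l with
  | nil => intro a; rfl
  | cons x t ih => intro a; simp [List.foldl_append, ih]

theorem gOpt_eq (board : List (List String)) (n i j : Nat) :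
    (if pvCell board i j = "F" then some (pvGapB board n i j) else none) = gOpt board n i j := by
  rw [gOpt, gapB_eq_twl]

theorem rooms_min_eq (board : List (List String)) :
    List.foldl omin none ((pvRooms board).map some)
      = Kopt board board.length (board.headD []).length := by
  set n := board.length with hn
  set m := (board.headD []).length with hm
  show List.foldl omin none
      ((((List.range n).foldl (fun rooms i =>
          (List.range m).foldl (fun (rooms : List Nat) j =>
            if pvCell board i j = "F" then rooms ++ [pvGapB board n i j] else rooms) rooms) [])).map some)
    = Kopt board n m
  have hrooms : (List.range n).foldl (fun rooms i =>
      (List.range m).foldl (fun (rooms : List Nat) j =>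
        if pvCell board i j = "F" then rooms ++ [pvGapB board n i j] else rooms) rooms) []
      = (List.range n).flatMap (fun i =>
          ((List.range m).filter (fun j => decide (pvCell board i j = "F"))).map (pvGapB board n i)) := by
    rw [foldl_congr_mem' (List.range n) _
      (fun rooms i => rooms ++ ((List.range m).filter
        (fun j => decide (pvCell board i j = "F"))).map (pvGapB board n i))
      (fun acc i _ => foldl_app_if (fun j => pvCell board i j = "F") (pvGapB board n i) _ acc)]
    rw [foldl_append_flat, List.nil_append]
  rw [hrooms, List.map_flatMap, foldl_omin_flat]
  have hrow : ∀ (a : Option Nat) (i : Nat),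
      ((((List.range m).filter (fun j => decide (pvCell board i j = "F"))).map
        (pvGapB board n i)).map some).foldl omin a
      = (List.range m).foldl (fun a j => omin a (gOpt board n i j)) a := by
    intro a i
    rw [List.map_map]; simp only [Function.comp_def]
    rw [foldl_omin_filter_map (fun j => pvCell board i j = "F")
      (fun j => some (pvGapB board n i j))]
    exact foldl_congr_mem' _ _ _ (fun acc j _ => by
      by_cases h : pvCell board i j = "F" <;> simp [h, ← gOpt_eq board n i j]) a
  rw [foldl_congr_mem' (List.range n) _
    (fun a i => (List.range m).foldl (fun a j => omin a (gOpt board n i j)) a)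
    (fun acc i _ => hrow acc i)]
  rw [swap_double_fold (fun i j => gOpt board n i j) n m none]
  unfold Kopt
  exact foldl_congr_mem' _ _ _ (fun acc j _ => col_fold_eq_Sfun board n j acc) none

-- nonemptiness under Pre_ ----------------------------------------------------
theorem pvRooms_eq (board : List (List String)) :
    pvRooms board = (List.range board.length).flatMap (fun i =>
      ((List.range (board.headD []).length).filter
        (fun j => decide (pvCell board i j = "F"))).map (pvGapB board board.length i)) := by
  set n := board.length
  set m := (board.headD []).length
  show (List.range n).foldl (fun rooms i =>
      (List.range m).foldl (fun (rooms : List Nat) j =>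
        if pvCell board i j = "F" then rooms ++ [pvGapB board n i j] else rooms) rooms) []
    = _
  rw [foldl_congr_mem' (List.range n) _
    (fun rooms i => rooms ++ ((List.range m).filter
      (fun j => decide (pvCell board i j = "F"))).map (pvGapB board n i))
    (fun acc i _ => foldl_app_if (fun j => pvCell board i j = "F") (pvGapB board n i) _ acc)]
  rw [foldl_append_flat, List.nil_append]

theorem mem_rooms (board : List (List String)) (i j : Nat)
    (hi : i < board.length) (hj : j < (board.headD []).length)
    (hF : pvCell board i j = "F") :
    pvGapB board board.length i j ∈ pvRooms board := by
  rw [pvRooms_eq]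
  exact List.mem_flatMap.mpr ⟨i, List.mem_range.mpr hi,
    List.mem_map.mpr ⟨j, List.mem_filter.mpr ⟨List.mem_range.mpr hj, by simp [hF]⟩, rfl⟩⟩

-- ===== VERDICT (by name: the statement is the Claim_ definition above) =====
theorem terris_spec : Claim_equal_terris := by
  intro board _ hpre
  obtain ⟨hne, hrows, i, hi, j, hj, hF⟩ := hpre
  rw [List.mem_range] at hi hj
  unfold Spec_terris
  have hmemr := mem_rooms board i j hi hj hF
  obtain ⟨h, t, hrt⟩ : ∃ h t, pvRooms board = h :: t := by
    cases hr : pvRooms board with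
    | nil => rw [hr] at hmemr; cases hmemr
    | cons a b => exact ⟨a, b, rfl⟩
  have hKB : List.foldl omin none ((pvRooms board).map some) = some (t.foldl min h) := by
    rw [hrt, List.map_cons, List.foldl_cons, omin_none_left]
    exact foldl_omin_some t h
  have hFall : List.foldl omin none (pvFall board) = some (t.foldl min h) := by
    rw [fall_min_eq, ← rooms_min_eq, hKB]
  obtain ⟨fh, ft, hft⟩ : ∃ fh ft, pvFall board = fh :: ft := by
    cases hf : pvFall board with
    | nil => rw [hf] at hFall; cases hFall
    | cons a b => exact ⟨a, b, rfl⟩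
  have hfmin : ft.foldl omin fh = some (t.foldl min h) := by
    rw [hft, List.foldl_cons, omin_none_left] at hFall
    exact hFall
  show terris board = terris_alt board
  unfold terris terris_alt
  rw [hft, hrt]
  show (match List.foldl omin fh ft with
        | some k => pvDropPhase board board.length (board.headD []).length k
        | none => board)
      = pvDropPhase board board.length (board.headD []).length (List.foldl min h t)
  rw [hfmin]
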